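-- pv_equiv track=rewrite | github.com/Akvarion/simod_docker | ros2_ws/src/ps_try/scripts/bt_xml_demo/mixins/gazebo_bridge.py | _pick_side_ee_link_index
-- ===== SOURCE A (Python) =====
-- from typing import List, Optional
--
-- def _pick_side_ee_link_index(link_names: List[str], side: str) -> Optional[int]:
--     side = str(side).lower()
--     token = "ur_left_paletta" if side == "left" else "ur_right_paletta"
--     if not link_names:
--         return None
--     lowered = [str(n).lower() for n in link_names]
--
--     # 1) exact suffix match (model::link)
--     for i, name in enumerate(lowered):
--         if name.endswith(f"::{token}") or name == token:
--             return i
--     # 2) contains fallback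
--     for i, name in enumerate(lowered):
--         if token in name:
--             return i
--     return None
-- ===== SOURCE B (Python) =====
-- from typing import List, Optional
--
-- def _pick_side_ee_link_index(link_names: List[str], side: str) -> Optional[int]:
--     token = "ur_left_paletta" if str(side).lower() == "left" else "ur_right_paletta"
--     suffix = "::" + token
--     fallback = None
--     for i, n in enumerate(link_names):
--         name = str(n).lower()
--         if name == token or name.endswith(suffix):
--             return i
--         if fallback is None and token in name:
--             fallback = i
--     return fallback
-- ===== Notes on version B (the rewrite author's own statement) =====
-- stated objective: alternative
-- what changed: Replaced A's two full priority passes (exact pass, then contains pass) over a pre-built lowered list by a single pass that lowers each name once, returns immediately on an exact match and remembers the first contains index as a fallback.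
import Mathlib
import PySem

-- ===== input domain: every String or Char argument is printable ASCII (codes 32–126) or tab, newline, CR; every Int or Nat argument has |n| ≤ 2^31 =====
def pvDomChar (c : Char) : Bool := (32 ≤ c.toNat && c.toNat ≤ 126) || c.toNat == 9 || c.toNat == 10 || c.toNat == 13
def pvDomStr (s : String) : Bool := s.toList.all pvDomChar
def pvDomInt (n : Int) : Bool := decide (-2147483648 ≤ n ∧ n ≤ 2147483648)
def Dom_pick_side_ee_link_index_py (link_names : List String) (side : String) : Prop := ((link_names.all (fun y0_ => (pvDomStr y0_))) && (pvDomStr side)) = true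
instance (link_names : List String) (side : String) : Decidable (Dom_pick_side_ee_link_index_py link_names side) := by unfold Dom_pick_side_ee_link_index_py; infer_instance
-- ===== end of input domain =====

-- B merges A's two priority passes into one pass with a remembered fallback index; same return value, one traversal.

-- ===== PORT A =====
-- loop 1: exact suffix match (model::link)
def pvFindExact (ls : List String) (suffix token : String) (i : Int) : Option Int :=
  match ls with
  | [] => none
  | name :: rest =>
    if PySem.Str.endswith name suffix || name == token then some i
    else pvFindExact rest suffix token (i + 1)

-- loop 2: contains fallback
def pvFindContains (ls : List String) (token : String) (i : Int) : Option Int :=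
  match ls with
  | [] => none
  | name :: rest =>
    if PySem.Str.isIn token name then some i
    else pvFindContains rest token (i + 1)

def pick_side_ee_link_index_py (link_names : List String) (side : String) : Option Int :=
  let sideL := PySem.Str.lower side
  let token := if sideL == "left" then "ur_left_paletta" else "ur_right_paletta"
  if link_names.isEmpty then none
  else
    let lowered := link_names.map (fun n => PySem.Str.lower n)
    match pvFindExact lowered ("::" ++ token) token 0 with
    | some i => some i
    | none => pvFindContains lowered token 0

-- ===== PORT B =====
-- single pass: return on exact match, remember the first contains index as fallback
def pvAltLoop (ls : List String) (token suffix : String) (i : Int) (fb : Option Int) : Option Int :=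
  match ls with
  | [] => fb
  | n :: rest =>
    let name := PySem.Str.lower n
    if name == token || PySem.Str.endswith name suffix then some i
    else pvAltLoop rest token suffix (i + 1)
      (if fb.isNone && PySem.Str.isIn token name then some i else fb)

def pick_side_ee_link_index_py_alt (link_names : List String) (side : String) : Option Int :=
  let token := if PySem.Str.lower side == "left" then "ur_left_paletta" else "ur_right_paletta"
  pvAltLoop link_names token ("::" ++ token) 0 none

-- ===== PRECONDITION & SPEC =====
def Spec_pick_side_ee_link_index_py (link_names : List String) (side : String) (out : Option Int) : Prop := out = pick_side_ee_link_index_py_alt link_names side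
instance (link_names : List String) (side : String) (out : Option Int) : Decidable (Spec_pick_side_ee_link_index_py link_names side out) := by unfold Spec_pick_side_ee_link_index_py; infer_instance

-- ===== CLAIM (what is proved, stated in full; the proofs are below) =====
def Claim_equal_pick_side_ee_link_index_py : Prop := ∀ (link_names : List String) (side : String), Dom_pick_side_ee_link_index_py link_names side → Spec_pick_side_ee_link_index_py link_names side (pick_side_ee_link_index_py link_names side)

-- ===== LEMMAS AND PROOFS =====
-- Loop-fusion invariant: the single pass with fallback fb equals exact-pass-then-(fb-or-contains-pass).
theorem pvAltLoop_eq (ls : List String) (token suffix : String) :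
    ∀ (i : Int) (fb : Option Int),
    pvAltLoop ls token suffix i fb =
      match pvFindExact (ls.map (fun n => PySem.Str.lower n)) suffix token i with
      | some j => some j
      | none =>
        match fb with
        | some f => some f
        | none => pvFindContains (ls.map (fun n => PySem.Str.lower n)) token i := by
  induction ls with
  | nil => intro i fb; cases fb <;> rfl
  | cons n rest ih =>
    intro i fb
    simp only [pvAltLoop, pvFindExact, pvFindContains, List.map]
    rw [Bool.or_comm]
    by_cases h : (PySem.Chars.endswith (PySem.Chars.lower n.toList) suffix.toList = true ∨ PySem.Str.lower n = token)
    · simp [h]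
    · simp [h]
      rw [ih]
      cases fb with
      | some f => simp
      | none =>
        by_cases hc : PySem.Chars.isIn token.toList (PySem.Chars.lower n.toList) = true
        · simp only [hc]
          cases pvFindExact (rest.map (fun n => PySem.Str.lower n)) suffix token (i + 1) <;> simp
        · simp only [hc]
          cases pvFindExact (rest.map (fun n => PySem.Str.lower n)) suffix token (i + 1) <;> simp

-- ===== VERDICT (by name: the statement is the Claim_ definition above) =====
theorem pick_side_ee_link_index_py_spec : Claim_equal_pick_side_ee_link_index_py := by
  intro link_names side _
  unfold Spec_pick_side_ee_link_index_py pick_side_ee_link_index_py pick_side_ee_link_index_py_alt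
  cases link_names with
  | nil => rfl
  | cons n rest => rw [pvAltLoop_eq]; simp
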